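-- pv_equiv track=rewrite | github.com/MrBrantCode/unitest_baseline | mut_generate/mist_train_cf/cf_18150/solution.py | filter_keywords
-- ===== SOURCE A (Python) =====
-- def filter_keywords(text, keywords):
--     # Convert the input text to lowercase for case-insensitive matching
--     text_lower = text.lower()
--     # Initialize an empty result string
--     result = ""
--     # Initialize a dictionary to keep track of removed keywords
--     removed_keywords = {}
--
--     # Iterate over each character in the text
--     i = 0
--     while i < len(text):
--         # Check if the current character is a potential start of a keyword
--         if text_lower[i] in {keyword[0].lower() for keyword in keywords}:
--             # Iterate over each keyword
--             for keyword in keywords: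
--                 # Check if the current keyword matches the remaining text
--                 if text_lower[i:i+len(keyword)].startswith(keyword.lower()):
--                     # Add the keyword to the removed_keywords dictionary
--                     removed_keywords[keyword] = True
--                     # Move the index to the end of the keyword
--                     i += len(keyword)
--                     break
--             else:
--                 # If no keyword match was found, add the current character to the result string
--                 result += text[i]
--                 i += 1
--         else:
--             # If the current character is not the start of a keyword, add it to the result string
--             result += text[i]
--             i += 1
--
--     # Remove the removed keywords from the result string
--     for keyword in removed_keywords.keys():
--         result = result.replace(keyword, "")
--
--     return result
-- ===== SOURCE B (Python) =====
-- def filter_keywords(text, keywords):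
--     # Substring-dictionary matcher: one hash table keyed by the LOWERED keyword,
--     # mapping to (list index, original keyword); at each text position we look up
--     # the slice of each distinct keyword length and keep the hit with the smallest
--     # list index, which is exactly the first keyword of the list that matches there.
--     table = {}
--     for idx, kw in enumerate(keywords):
--         table.setdefault(kw.lower(), (idx, kw))
--     lengths = sorted({len(low) for low in table})
--     text_lower = text.lower()
--     out = []
--     removed = {}
--     i = 0
--     n = len(text)
--     while i < n:
--         best = None
--         for L in lengths:
--             hit = table.get(text_lower[i:i+L])
--             if hit is not None and (best is None or hit[0] < best[0]):
--                 best = hit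
--         if best is None:
--             out.append(text[i])
--             i += 1
--         else:
--             removed[best[1]] = True
--             i += len(best[1])
--     result = "".join(out)
--     for kw in removed:
--         result = result.replace(kw, "")
--     return result
-- ===== Notes on version B (the rewrite author's own statement) =====
-- stated objective: faster
-- what changed: B replaces A's per-position scan of the whole keyword list (with a rebuilt first-letter set each step) by a substring-dictionary matcher: one hash table keyed by the lowered keyword mapping to (list index, original keyword), looked up once per distinct keyword length at each position, keeping the hit with the smallest list index; the per-position keyword scan disappears.
import Mathlib
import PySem

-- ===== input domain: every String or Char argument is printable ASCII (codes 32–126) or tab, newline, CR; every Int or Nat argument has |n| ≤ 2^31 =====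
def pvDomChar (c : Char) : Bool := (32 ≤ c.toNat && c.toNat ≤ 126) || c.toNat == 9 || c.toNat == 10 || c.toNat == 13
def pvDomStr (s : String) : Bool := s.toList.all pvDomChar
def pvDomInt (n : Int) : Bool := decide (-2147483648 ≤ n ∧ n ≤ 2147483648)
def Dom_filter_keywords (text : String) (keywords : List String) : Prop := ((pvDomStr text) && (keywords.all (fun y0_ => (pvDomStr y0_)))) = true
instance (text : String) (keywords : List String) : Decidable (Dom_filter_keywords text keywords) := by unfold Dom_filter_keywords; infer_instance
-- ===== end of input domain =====

-- B replaces A's per-position scan of the whole keyword list by a substring dictionary: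
-- one hash table keyed by the lowered keyword, looked up once per distinct keyword
-- length at each position, keeping the hit with the smallest list index.

-- ===== PORT A =====
-- {keyword[0].lower() for keyword in keywords}; the ' ' default for keyword[0] is only reached outside Pre_ (empty keyword)
def aFirstSet (keywords : List String) : PySem.Set Char :=
  PySem.Set.ofList (keywords.map (fun kw => PySem.Chars.lowerChar (kw.toList.headD ' ')))

-- the inner 'for keyword in keywords: … break / else': the matched keyword and the new i, or none
def aFind (tl : List Char) (i : Nat) : List String → Option (String × Nat)
  | [] => none
  | kw :: rest =>
    if PySem.Chars.startswith
        (PySem.List.slice tl (some (i : Int)) (some ((i : Int) + (kw.toList.length : Int))))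
        (PySem.Chars.lower kw.toList)
    then some (kw, i + kw.toList.length)
    else aFind tl i rest

-- the while loop; fuel = len(text) iterations suffice under Pre_ (each step advances i by ≥ 1)
def aLoop (keywords : List String) (t tl : List Char) :
    Nat → Nat → List Char → PySem.Dict String Bool → List Char × PySem.Dict String Bool
  | 0, _, res, rem => (res, rem)
  | fuel+1, i, res, rem =>
    if i < t.length then
      if PySem.Set.contains (aFirstSet keywords) (PySem.List.pyGetD tl (i : Int) ' ') then
        match aFind tl i keywords with
        | some (kw, i') => aLoop keywords t tl fuel i' res (rem.insert kw true)
        | none => aLoop keywords t tl fuel (i+1) (res ++ [PySem.List.pyGetD t (i : Int) ' ']) rem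
      else aLoop keywords t tl fuel (i+1) (res ++ [PySem.List.pyGetD t (i : Int) ' ']) rem
    else (res, rem)

def filter_keywords (text : String) (keywords : List String) : String :=
  let st := aLoop keywords text.toList (PySem.Chars.lower text.toList) text.toList.length 0 [] PySem.Dict.empty
  String.ofList (st.2.keys.foldl (fun r kw => PySem.Chars.replace r kw.toList []) st.1)

-- ===== PORT B =====
-- table.setdefault(kw.lower(), (idx, kw)) over enumerate(keywords)
def bTable (keywords : List String) : PySem.Dict (List Char) (Int × String) :=
  (PySem.List.enumerate keywords 0).foldl
    (fun d p => d.setdefault (PySem.Chars.lower p.2.toList) p) PySem.Dict.empty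

-- lengths = sorted({len(low) for low in table})
def bLens (t : PySem.Dict (List Char) (Int × String)) : List Int :=
  PySem.List.sorted (PySem.Set.ofList (t.keys.map (fun k => (k.length : Int)))) (fun x => x) false

-- the inner 'for L in lengths: hit = table.get(…); keep the smallest-index hit'
def bBest (t : PySem.Dict (List Char) (Int × String)) (tl : List Char) (i : Nat)
    (lens : List Int) : Option (Int × String) :=
  lens.foldl (fun best L =>
    match t.get? (PySem.List.slice tl (some (i : Int)) (some ((i : Int) + L))) with
    | some hit =>
      match best with
      | none => some hit
      | some b => if hit.1 < b.1 then some hit else some b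
    | none => best) none

-- the while loop of B; same fuel discipline as aLoop
def bLoop (t : PySem.Dict (List Char) (Int × String)) (lens : List Int) (txt tl : List Char) :
    Nat → Nat → List Char → PySem.Dict String Bool → List Char × PySem.Dict String Bool
  | 0, _, res, rem => (res, rem)
  | fuel+1, i, res, rem =>
    if i < txt.length then
      match bBest t tl i lens with
      | some h => bLoop t lens txt tl fuel (i + h.2.toList.length) res (rem.insert h.2 true)
      | none => bLoop t lens txt tl fuel (i+1) (res ++ [PySem.List.pyGetD txt (i : Int) ' ']) rem
    else (res, rem)

def filter_keywords_alt (text : String) (keywords : List String) : String :=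
  let t := bTable keywords
  let st := bLoop t (bLens t) text.toList (PySem.Chars.lower text.toList) text.toList.length 0 [] PySem.Dict.empty
  String.ofList (st.2.keys.foldl (fun r kw => PySem.Chars.replace r kw.toList []) st.1)

-- ===== PRECONDITION & SPEC =====
-- Pre_ excludes exactly the inputs where A raises: a nonempty text together with a keyword
-- list containing the empty string (A's set comprehension evaluates keyword[0] → IndexError).
def Pre_filter_keywords (text : String) (keywords : List String) : Prop :=
  "" ∈ keywords → text = ""
instance (text : String) (keywords : List String) : Decidable (Pre_filter_keywords text keywords) := by
  unfold Pre_filter_keywords; infer_instance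

def pvWitness_filter_keywords : String × List String := ("aBc ab", ["b", "zz"])

def Spec_filter_keywords (text : String) (keywords : List String) (out : String) : Prop := out = filter_keywords_alt text keywords
instance (text : String) (keywords : List String) (out : String) : Decidable (Spec_filter_keywords text keywords out) := by unfold Spec_filter_keywords; infer_instance

-- ===== CLAIM (what is proved, stated in full; the proofs are below) =====
def Claim_equal_filter_keywords : Prop := ∀ (text : String) (keywords : List String), Dom_filter_keywords text keywords → Pre_filter_keywords text keywords → Spec_filter_keywords text keywords (filter_keywords text keywords)

-- ===== LEMMAS AND PROOFS =====

-- 'keyword (lowered) matches the lowered text at position i' — the shared match predicate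
def mtchB (tl : List Char) (i : Nat) (kw : String) : Bool :=
  decide (PySem.List.slice tl (some (i : Int)) (some ((i : Int) + (kw.toList.length : Int)))
          = PySem.Chars.lower kw.toList)

-- the fold step of bBest, named for the proofs
def bStep (t : PySem.Dict (List Char) (Int × String)) (tl : List Char) (i : Nat) :
    Option (Int × String) → Int → Option (Int × String) :=
  fun best L =>
    match t.get? (PySem.List.slice tl (some (i : Int)) (some ((i : Int) + L))) with
    | some hit =>
      match best with
      | none => some hit
      | some b => if hit.1 < b.1 then some hit else some b
    | none => best

lemma bBest_eq_foldl (t : PySem.Dict (List Char) (Int × String)) (tl : List Char) (i : Nat)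
    (lens : List Int) : bBest t tl i lens = lens.foldl (bStep t tl i) none := rfl

lemma toList_ne_nil (s : String) (h : s ≠ "") : s.toList ≠ [] := by
  intro hc
  apply h
  have := congrArg String.ofList hc
  simpa using this

lemma length_lower (cs : List Char) : (PySem.Chars.lower cs).length = cs.length := by
  simp [PySem.Chars.lower]

lemma headD_lower (cs : List Char) (h : cs ≠ []) :
    (PySem.Chars.lower cs).headD ' ' = PySem.Chars.lowerChar (cs.headD ' ') := by
  cases cs with
  | nil => exact absurd rfl h
  | cons c cs' => simp [PySem.Chars.lower]

lemma startswith_of_len_le (s p : List Char) (h : s.length ≤ p.length) :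
    PySem.Chars.startswith s p = decide (s = p) := by
  by_cases he : s = p
  · subst he
    simp [PySem.Chars.startswith_iff]
  · rw [decide_eq_false he]
    rw [Bool.eq_false_iff]
    intro hx
    exact he (((PySem.Chars.startswith_iff s p).mp hx).eq_of_length_le h).symm

lemma aFind_eq_find? (tl : List Char) (i : Nat) (kws : List String) :
    aFind tl i kws = (kws.find? (mtchB tl i)).map (fun kw => (kw, i + kw.toList.length)) := by
  induction kws with
  | nil => rfl
  | cons kw rest ih =>
    have hlen : (PySem.List.slice tl (some (i : Int)) (some ((i : Int) + (kw.toList.length : Int)))).length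
        ≤ (PySem.Chars.lower kw.toList).length := by
      rw [PySem.List.slice_natCast_add, length_lower]
      exact le_trans (List.length_take_le _ _) (le_refl _)
    rw [aFind, startswith_of_len_le _ _ hlen, List.find?]
    cases hm : mtchB tl i kw with
    | true =>
      have hd : decide (PySem.List.slice tl (some (i : Int)) (some ((i : Int) + (kw.toList.length : Int)))
          = PySem.Chars.lower kw.toList) = true := hm
      simp only [hd]
      simp
    | false =>
      have hd : decide (PySem.List.slice tl (some (i : Int)) (some ((i : Int) + (kw.toList.length : Int)))
          = PySem.Chars.lower kw.toList) = false := hm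
      simp only [hd]
      simp [ih]

lemma find?_map_enumerate (kws : List String) (p : String → Bool) :
    ∀ s : Int, kws.find? p = ((PySem.List.enumerate kws s).find? (fun q => p q.2)).map (fun q => q.2) := by
  induction kws with
  | nil => intro s; rfl
  | cons kw rest ih =>
    intro s
    rw [PySem.List.enumerate_cons, List.find?, List.find?]
    cases hp : p kw with
    | true => simp
    | false => simp [ih (s+1)]

lemma get?_foldl_setdefault (f : List Char) :
    ∀ (l : List (Int × String)) (d : PySem.Dict (List Char) (Int × String)),
      (l.foldl (fun d p => d.setdefault (PySem.Chars.lower p.2.toList) p) d).get? f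
      = (d.get? f).or (l.find? (fun p => PySem.Chars.lower p.2.toList == f)) := by
  intro l
  induction l with
  | nil => intro d; simp
  | cons p l ih =>
    intro d
    rw [List.foldl_cons, ih, List.find?]
    by_cases he : PySem.Chars.lower p.2.toList = f
    · subst he
      rw [PySem.Dict.get?_setdefault_self]
      simp only [beq_self_eq_true]
      cases hd : d.get? (PySem.Chars.lower p.2.toList) with
      | none => simp
      | some v => simp
    · rw [PySem.Dict.get?_setdefault_of_ne d p (Ne.symm he)]
      have hb : (PySem.Chars.lower p.2.toList == f) = false := by simpa using he
      simp only [hb]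

lemma get?_bTable (kws : List String) (f : List Char) :
    (bTable kws).get? f
      = (PySem.List.enumerate kws 0).find? (fun p => PySem.Chars.lower p.2.toList == f) := by
  rw [bTable, get?_foldl_setdefault]
  simp

-- take n d prefix identity: take (|take n d|) d = take n d
lemma take_len_take (d : List Char) (n : Nat) : d.take (d.take n).length = d.take n := by
  by_cases h : n ≤ d.length
  · rw [List.length_take, min_eq_left h]
  · have hd : d.take n = d := List.take_of_length_le (by omega)
    rw [hd, List.take_length]

lemma hit_matches (kws : List String) (tl : List Char) (i : Nat) (L : Int)
    (hL : L ∈ bLens (bTable kws)) (h : Int × String)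
    (hh : (bTable kws).get? (PySem.List.slice tl (some (i : Int)) (some ((i : Int) + L))) = some h) :
    h ∈ PySem.List.enumerate kws 0 ∧ mtchB tl i h.2 = true := by
  have hLnat : ∃ n : Nat, L = (n : Int) := by
    rw [bLens, PySem.List.mem_sorted, PySem.Set.mem_ofList] at hL
    obtain ⟨k, _, hk⟩ := List.mem_map.mp hL
    exact ⟨k.length, hk.symm⟩
  obtain ⟨n, rfl⟩ := hLnat
  rw [get?_bTable] at hh
  have hmem := List.mem_of_find?_eq_some hh
  have hpred := List.find?_some hh
  have heq : PySem.Chars.lower h.2.toList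
      = PySem.List.slice tl (some (i : Int)) (some ((i : Int) + (n : Int))) := by
    simpa using hpred
  refine ⟨hmem, ?_⟩
  rw [mtchB, decide_eq_true_eq]
  rw [PySem.List.slice_natCast_add] at heq ⊢
  have hlen2 : h.2.toList.length = ((tl.drop i).take n).length := by
    rw [← heq, length_lower]
  rw [hlen2, take_len_take, heq]

lemma find?_key_of_find?_pred (pred : Int × String → Bool) (key : Int × String → List Char)
    (p0 : Int × String) (hcong : ∀ q, key q = key p0 → pred q = true) :
    ∀ l : List (Int × String), l.find? pred = some p0 →
      l.find? (fun q => key q == key p0) = some p0 := by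
  intro l
  induction l with
  | nil => intro h; exact absurd h (by simp)
  | cons a l ih =>
    intro h
    rw [List.find?] at h ⊢
    cases ha : pred a with
    | true =>
      rw [ha] at h
      simp only [Option.some.injEq] at h
      subst h
      simp
    | false =>
      rw [ha] at h
      simp only at h
      have hk : (key a == key p0) = false := by
        apply beq_eq_false_iff_ne.mpr
        intro he
        have hc := hcong a he
        rw [ha] at hc
        exact Bool.false_ne_true hc
      rw [hk]
      simpa using ih h

-- p0, the first matcher, is the table representative of its lowered form, and its length is in lens
lemma first_matcher_hit (kws : List String) (tl : List Char) (i : Nat) (p0 : Int × String)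
    (hf : (PySem.List.enumerate kws 0).find? (fun q => mtchB tl i q.2) = some p0) :
    ∃ L ∈ bLens (bTable kws),
      (bTable kws).get? (PySem.List.slice tl (some (i : Int)) (some ((i : Int) + L))) = some p0 := by
  have hp0 : mtchB tl i p0.2 = true := by
    have := List.find?_some hf
    simpa using this
  have hslice : PySem.List.slice tl (some (i : Int)) (some ((i : Int) + (p0.2.toList.length : Int)))
      = PySem.Chars.lower p0.2.toList := by
    have hm := hp0
    rw [mtchB, decide_eq_true_eq] at hm
    exact hm
  have hcong : ∀ q : Int × String,
      (fun q : Int × String => PySem.Chars.lower q.2.toList) q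
        = (fun q : Int × String => PySem.Chars.lower q.2.toList) p0 →
      (fun q : Int × String => mtchB tl i q.2) q = true := by
    intro q he
    simp only at he
    have hlq : q.2.toList.length = p0.2.toList.length := by
      have := congrArg List.length he
      rwa [length_lower, length_lower] at this
    show mtchB tl i q.2 = true
    rw [mtchB, hlq, he, decide_eq_true_eq]
    exact hslice
  have hkey := find?_key_of_find?_pred (fun q => mtchB tl i q.2)
    (fun q : Int × String => PySem.Chars.lower q.2.toList) p0 hcong _ hf
  have hget : (bTable kws).get? (PySem.Chars.lower p0.2.toList) = some p0 := by
    rw [get?_bTable]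
    exact hkey
  refine ⟨(p0.2.toList.length : Int), ?_, ?_⟩
  · rw [bLens, PySem.List.mem_sorted, PySem.Set.mem_ofList]
    apply List.mem_map.mpr
    refine ⟨PySem.Chars.lower p0.2.toList, ?_, by rw [length_lower]⟩
    by_contra hmemk
    rw [← PySem.Dict.get?_eq_none_iff_not_mem_keys] at hmemk
    rw [hmemk] at hget
    exact absurd hget (by simp)
  · rw [hslice]
    exact hget

-- find? minimality over the strictly index-increasing enumerate list
lemma find?_min (pred : Int × String → Bool) (p0 : Int × String) :
    ∀ l : List (Int × String), l.Pairwise (fun a b => a.1 < b.1) → l.find? pred = some p0 →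
    ∀ q ∈ l, pred q = true → p0.1 ≤ q.1 ∧ (q.1 ≤ p0.1 → q = p0) := by
  intro l
  induction l with
  | nil => intro _ h; exact absurd h (by simp)
  | cons a l ih =>
    intro hpw hf q hq hpq
    rw [List.pairwise_cons] at hpw
    rw [List.find?] at hf
    cases ha : pred a with
    | true =>
      rw [ha] at hf
      simp only [Option.some.injEq] at hf
      subst hf
      rcases List.mem_cons.mp hq with rfl | hql
      · exact ⟨le_refl _, fun _ => rfl⟩
      · have := hpw.1 q hql
        exact ⟨le_of_lt this, fun hle => absurd this (by omega)⟩
    | false =>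
      rw [ha] at hf
      simp only at hf
      rcases List.mem_cons.mp hq with rfl | hql
      · rw [ha] at hpq; exact absurd hpq (by simp)
      · exact ih hpw.2 hf q hql hpq

lemma foldl_bStep_none (t : PySem.Dict (List Char) (Int × String)) (tl : List Char) (i : Nat) :
    ∀ (lens : List Int) (b : Option (Int × String)),
      (∀ L ∈ lens, t.get? (PySem.List.slice tl (some (i : Int)) (some ((i : Int) + L))) = none) →
      lens.foldl (bStep t tl i) b = b := by
  intro lens
  induction lens with
  | nil => intro b _; rfl
  | cons L lens ih =>
    intro b hnone
    rw [List.foldl_cons]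
    have hstep : bStep t tl i b L = b := by
      rw [bStep]
      simp only [hnone L List.mem_cons_self]
    rw [hstep]
    exact ih b (fun L' hL' => hnone L' (List.mem_cons_of_mem _ hL'))

lemma foldl_bStep_some (t : PySem.Dict (List Char) (Int × String)) (tl : List Char) (i : Nat)
    (p0 : Int × String) :
    ∀ (lens : List Int) (b : Option (Int × String)),
      (∀ L ∈ lens, ∀ h, t.get? (PySem.List.slice tl (some (i : Int)) (some ((i : Int) + L))) = some h →
        p0.1 ≤ h.1 ∧ (h.1 ≤ p0.1 → h = p0)) →
      (b = none ∨ ∃ hb, b = some hb ∧ p0.1 ≤ hb.1 ∧ (hb.1 ≤ p0.1 → hb = p0)) →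
      ((∃ L ∈ lens, t.get? (PySem.List.slice tl (some (i : Int)) (some ((i : Int) + L))) = some p0)
        ∨ b = some p0) →
      lens.foldl (bStep t tl i) b = some p0 := by
  intro lens
  induction lens with
  | nil =>
    intro b _ _ hex
    rcases hex with ⟨L, hL, _⟩ | hb
    · exact absurd hL (by simp)
    · simpa using hb
  | cons L lens ih =>
    intro b hbnd hb hex
    rw [List.foldl_cons]
    have hbndL := hbnd L List.mem_cons_self
    have hbnd' : ∀ L' ∈ lens, ∀ h, t.get? (PySem.List.slice tl (some (i : Int)) (some ((i : Int) + L'))) = some h →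
        p0.1 ≤ h.1 ∧ (h.1 ≤ p0.1 → h = p0) :=
      fun L' hL' => hbnd L' (List.mem_cons_of_mem _ hL')
    cases hlook : t.get? (PySem.List.slice tl (some (i : Int)) (some ((i : Int) + L))) with
    | none =>
      have hstep : bStep t tl i b L = b := by rw [bStep]; simp only [hlook]
      rw [hstep]
      apply ih b hbnd' hb
      rcases hex with ⟨L', hL', hs⟩ | hbp
      · rcases List.mem_cons.mp hL' with rfl | hL'm
        · rw [hlook] at hs; exact absurd hs (by simp)
        · exact Or.inl ⟨L', hL'm, hs⟩
      · exact Or.inr hbp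
    | some h =>
      obtain ⟨hge, himp⟩ := hbndL h hlook
      rcases hb with rfl | ⟨hb', rfl, hbge, hbimp⟩
      · have hstep : bStep t tl i none L = some h := by rw [bStep]; simp only [hlook]
        rw [hstep]
        by_cases hhp : h = p0
        · subst hhp
          exact ih (some h) hbnd' (Or.inr ⟨h, rfl, le_refl _, fun _ => rfl⟩) (Or.inr rfl)
        · apply ih (some h) hbnd' (Or.inr ⟨h, rfl, hge, himp⟩)
          rcases hex with ⟨L', hL', hs⟩ | hbp
          · rcases List.mem_cons.mp hL' with rfl | hL'm
            · rw [hlook] at hs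
              exact absurd (Option.some.inj hs) hhp
            · exact Or.inl ⟨L', hL'm, hs⟩
          · exact absurd hbp (by simp)
      · have hstep : bStep t tl i (some hb') L = if h.1 < hb'.1 then some h else some hb' := by
          rw [bStep]; simp only [hlook]
        rw [hstep]
        by_cases hcmp : h.1 < hb'.1
        · rw [if_pos hcmp]
          apply ih (some h) hbnd' (Or.inr ⟨h, rfl, hge, himp⟩)
          rcases hex with ⟨L', hL', hs⟩ | hbp
          · rcases List.mem_cons.mp hL' with rfl | hL'm
            · rw [hlook] at hs
              exact Or.inr (by rw [Option.some.inj hs])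
            · exact Or.inl ⟨L', hL'm, hs⟩
          · have hbp' : hb' = p0 := Option.some.inj hbp
            subst hbp'
            exact Or.inr (by rw [himp (by omega)])
        · rw [if_neg hcmp]
          apply ih (some hb') hbnd' (Or.inr ⟨hb', rfl, hbge, hbimp⟩)
          rcases hex with ⟨L', hL', hs⟩ | hbp
          · rcases List.mem_cons.mp hL' with rfl | hL'm
            · rw [hlook] at hs
              have hhp0 : h = p0 := Option.some.inj hs
              subst hhp0
              exact Or.inr (by rw [hbimp (by omega)])
            · exact Or.inl ⟨L', hL'm, hs⟩
          · exact Or.inr hbp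

lemma gate_of_matcher (kws : List String) (tl : List Char) (i : Nat) (hi : i < tl.length)
    (kw : String) (hmem : kw ∈ kws) (hne : kw ≠ "") (hm : mtchB tl i kw = true) :
    PySem.Set.contains (aFirstSet kws) (PySem.List.pyGetD tl (i : Int) ' ') = true := by
  have hkw : kw.toList ≠ [] := toList_ne_nil kw hne
  rw [mtchB, decide_eq_true_eq, PySem.List.slice_natCast_add] at hm
  have hd : tl.drop i = tl[i] :: tl.drop (i+1) := List.drop_eq_getElem_cons hi
  have hn : kw.toList.length = (kw.toList.length - 1) + 1 := by
    cases hcs : kw.toList with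
    | nil => exact absurd hcs hkw
    | cons c cs => simp
  rw [hd, hn, List.take_succ_cons] at hm
  have hhead : (PySem.Chars.lower kw.toList).headD ' ' = tl[i] := by
    rw [← hm]; rfl
  rw [headD_lower kw.toList hkw] at hhead
  have hget : PySem.List.pyGetD tl (i : Int) ' ' = tl[i] := by
    rw [PySem.List.pyGetD_natCast]
    exact List.getD_eq_getElem tl ' ' hi
  rw [hget, ← hhead]
  rw [PySem.Set.contains_iff]
  rw [aFirstSet, PySem.Set.mem_ofList]
  exact List.mem_map.mpr ⟨kw, hmem, rfl⟩

lemma step_eq (kws : List String) (tl : List Char) (i : Nat) (hi : i < tl.length)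
    (hne : ∀ kw ∈ kws, kw ≠ "") :
    (if PySem.Set.contains (aFirstSet kws) (PySem.List.pyGetD tl (i : Int) ' ')
      then aFind tl i kws else none)
    = (bBest (bTable kws) tl i (bLens (bTable kws))).map (fun h => (h.2, i + h.2.toList.length)) := by
  rw [bBest_eq_foldl]
  cases hf : (PySem.List.enumerate kws 0).find? (fun q => mtchB tl i q.2) with
  | none =>
    have hfindA : kws.find? (mtchB tl i) = none := by
      rw [find?_map_enumerate kws (mtchB tl i) 0, hf]
      rfl
    have hnone : ∀ L ∈ bLens (bTable kws),
        (bTable kws).get? (PySem.List.slice tl (some (i : Int)) (some ((i : Int) + L))) = none := by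
      intro L hL
      cases hh : (bTable kws).get? (PySem.List.slice tl (some (i : Int)) (some ((i : Int) + L))) with
      | none => rfl
      | some h =>
        obtain ⟨hmem, hmtch⟩ := hit_matches kws tl i L hL h hh
        have := List.find?_eq_none.mp hf h hmem
        simp only [hmtch] at this
        exact (this trivial).elim
    rw [foldl_bStep_none (bTable kws) tl i _ none hnone]
    rw [aFind_eq_find?, hfindA]
    simp
  | some p0 =>
    have hp0 : mtchB tl i p0.2 = true := by
      have := List.find?_some hf
      simpa using this
    have hp0mem : p0.2 ∈ kws := by
      have hmem := List.mem_of_find?_eq_some hf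
      rw [PySem.List.mem_enumerate_iff] at hmem
      obtain ⟨k, hk, hpk⟩ := hmem
      rw [hpk]
      exact List.getElem_mem hk
    have hgate := gate_of_matcher kws tl i hi p0.2 hp0mem (hne p0.2 hp0mem) hp0
    rw [if_pos hgate]
    have hbnd : ∀ L ∈ bLens (bTable kws), ∀ h,
        (bTable kws).get? (PySem.List.slice tl (some (i : Int)) (some ((i : Int) + L))) = some h →
        p0.1 ≤ h.1 ∧ (h.1 ≤ p0.1 → h = p0) := by
      intro L hL h hh
      obtain ⟨hmem, hmtch⟩ := hit_matches kws tl i L hL h hh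
      exact find?_min (fun q => mtchB tl i q.2) p0 _
        (PySem.List.pairwise_lt_enumerate kws 0) hf h hmem (by simpa using hmtch)
    rw [foldl_bStep_some (bTable kws) tl i p0 _ none hbnd (Or.inl rfl)
      (Or.inl (first_matcher_hit kws tl i p0 hf))]
    rw [aFind_eq_find?, find?_map_enumerate kws (mtchB tl i) 0, hf]
    rfl

lemma loop_eq (kws : List String) (t tl : List Char) (hlen : tl.length = t.length)
    (hne : ∀ kw ∈ kws, kw ≠ "") :
    ∀ (fuel i : Nat) (res : List Char) (rem : PySem.Dict String Bool),
      aLoop kws t tl fuel i res rem = bLoop (bTable kws) (bLens (bTable kws)) t tl fuel i res rem := by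
  intro fuel
  induction fuel with
  | zero => intro i res rem; rfl
  | succ fuel ih =>
    intro i res rem
    simp only [aLoop, bLoop]
    by_cases hi : i < t.length
    · rw [if_pos hi, if_pos hi]
      have hitl : i < tl.length := by omega
      have hstep := step_eq kws tl i hitl hne
      rw [bBest_eq_foldl] at hstep
      cases hbb : (bLens (bTable kws)).foldl (bStep (bTable kws) tl i) none with
      | none =>
        rw [hbb] at hstep
        rw [bBest_eq_foldl, hbb]
        by_cases hgate : PySem.Set.contains (aFirstSet kws) (PySem.List.pyGetD tl (i : Int) ' ') = true
        · rw [if_pos hgate] at hstep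
          rw [if_pos hgate, hstep]
          exact ih (i+1) _ rem
        · rw [if_neg hgate]
          exact ih (i+1) _ rem
      | some h =>
        rw [hbb] at hstep
        rw [bBest_eq_foldl, hbb]
        by_cases hgate : PySem.Set.contains (aFirstSet kws) (PySem.List.pyGetD tl (i : Int) ' ') = true
        · rw [if_pos hgate] at hstep
          rw [if_pos hgate, hstep]
          exact ih (i + h.2.toList.length) res _
        · rw [if_neg hgate] at hstep
          exact absurd hstep.symm (by simp)
    · rw [if_neg hi, if_neg hi]

-- ===== VERDICT (by name: the statement is the Claim_ definition above) =====
theorem filter_keywords_spec : Claim_equal_filter_keywords := by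
  intro text keywords _ hpre
  unfold Spec_filter_keywords
  by_cases hmem : "" ∈ keywords
  · have ht := hpre hmem
    subst ht
    rfl
  · have hne : ∀ kw ∈ keywords, kw ≠ "" := fun kw hk hc => hmem (hc ▸ hk)
    unfold filter_keywords filter_keywords_alt
    rw [loop_eq keywords text.toList (PySem.Chars.lower text.toList)
      (length_lower text.toList) hne text.toList.length 0 [] PySem.Dict.empty]
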